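-- pv_equiv track=rewrite | github.com/rediculousnilesh-droid/roc-ot-scheduling-tool | python-server/modules/slot_manager.py | cancel_slot
-- ===== SOURCE A (Python) =====
-- def cancel_slot(slots, slot_id):
--     """Cancels a slot. Must be in 'Created' or 'Released' status."""
--     result = []
--     for slot in slots:
--         if slot['id'] != slot_id:
--             result.append(slot)
--         else:
--             if slot['status'] not in ('Created', 'Released'):
--                 raise ValueError(f'Slot cannot be cancelled from "{slot["status"]}" status.')
--             new_slot = dict(slot)
--             new_slot['status'] = 'Cancelled'
--             result.append(new_slot)
--     return result
-- ===== SOURCE B (Python) =====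
-- def cancel_slot(slots, slot_id):
--     """Cancels a slot. Must be in 'Created' or 'Released' status."""
--     for slot in slots:
--         if slot['id'] == slot_id and slot['status'] not in ('Created', 'Released'):
--             raise ValueError(f'Slot cannot be cancelled from "{slot["status"]}" status.')
--     return [dict(slot, status='Cancelled') if slot['id'] == slot_id else slot
--             for slot in slots]
-- ===== Notes on version B (the rewrite author's own statement) =====
-- stated objective: simpler
-- what changed: Splits the fused branchy accumulator loop into a validation pass (raising on the first non-cancellable match) followed by a list comprehension that builds the result.
import Mathlib
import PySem

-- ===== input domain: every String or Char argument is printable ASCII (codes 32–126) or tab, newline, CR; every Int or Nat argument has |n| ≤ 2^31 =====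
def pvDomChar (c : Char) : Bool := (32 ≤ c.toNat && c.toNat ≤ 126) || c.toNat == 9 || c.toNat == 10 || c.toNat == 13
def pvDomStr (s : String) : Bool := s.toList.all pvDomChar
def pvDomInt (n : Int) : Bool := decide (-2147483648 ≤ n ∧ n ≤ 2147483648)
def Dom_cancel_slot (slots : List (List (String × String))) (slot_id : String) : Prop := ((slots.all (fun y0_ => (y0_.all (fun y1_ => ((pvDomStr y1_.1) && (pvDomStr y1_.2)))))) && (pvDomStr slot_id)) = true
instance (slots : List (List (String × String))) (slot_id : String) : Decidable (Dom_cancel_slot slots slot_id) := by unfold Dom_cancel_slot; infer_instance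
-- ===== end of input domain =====

-- B replaces A's single branchy accumulator loop by a validation pass followed by a
-- comprehension-style map (objective: simpler). Equivalence is on return values within Pre_.

-- ===== PORT A =====
-- A's for-loop with the `result` accumulator; `none` models an exception
-- (KeyError on a missing 'id'/'status' key, or the explicit ValueError).
def cancel_slot_loopA (slot_id : String) :
    List (List (String × String)) → List (List (String × String)) →
    Option (List (List (String × String)))
  | [], result => some result
  | slot :: rest, result =>
    match (PySem.Dict.mk slot).get? "id" with
    | none => none   -- KeyError: slot['id']
    | some i =>
      if i ≠ slot_id then cancel_slot_loopA slot_id rest (result ++ [slot])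
      else
        match (PySem.Dict.mk slot).get? "status" with
        | none => none   -- KeyError: slot['status']
        | some st =>
          if st ≠ "Created" ∧ st ≠ "Released" then none   -- raise ValueError
          else
            -- new_slot = dict(slot); new_slot['status'] = 'Cancelled'
            cancel_slot_loopA slot_id rest
              (result ++ [((PySem.Dict.mk slot).insert "status" "Cancelled").items])

def cancel_slot (slots : List (List (String × String))) (slot_id : String) : List (List (String × String)) :=
  (cancel_slot_loopA slot_id slots []).getD []   -- .getD []: totality shim; Pre_ excludes the `none` (raising) inputs

-- ===== PORT B =====
-- B's validation pass: `false` models an exception (KeyError or ValueError).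
def cancel_slot_validate (slot_id : String) : List (List (String × String)) → Bool
  | [] => true
  | slot :: rest =>
    match (PySem.Dict.mk slot).get? "id" with
    | none => false   -- KeyError: slot['id']
    | some i =>
      if i = slot_id then
        match (PySem.Dict.mk slot).get? "status" with
        | none => false   -- KeyError: slot['status']
        | some st =>
          if st ≠ "Created" ∧ st ≠ "Released" then false   -- raise ValueError
          else cancel_slot_validate slot_id rest
      else cancel_slot_validate slot_id rest

def cancel_slot_alt (slots : List (List (String × String))) (slot_id : String) : List (List (String × String)) :=
  if cancel_slot_validate slot_id slots then
    -- the comprehension; after validation every slot has an 'id' key, so getD is slot['id']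
    slots.map (fun slot =>
      if (PySem.Dict.mk slot).getD "id" "" = slot_id
      then ((PySem.Dict.mk slot).insert "status" "Cancelled").items
      else slot)
  else []   -- unreachable under Pre_ (B raises there)

-- ===== PRECONDITION & SPEC =====
-- Pre_ excludes exactly the inputs on which A raises: a slot missing the 'id' key (KeyError),
-- a matching slot missing 'status' (KeyError), or a matching slot whose status is not
-- 'Created'/'Released' (ValueError).
def Pre_cancel_slot (slots : List (List (String × String))) (slot_id : String) : Prop :=
  ∀ slot ∈ slots, ((PySem.Dict.mk slot).get? "id").isSome = true ∧
    ((PySem.Dict.mk slot).get? "id" = some slot_id →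
      (PySem.Dict.mk slot).get? "status" = some "Created" ∨
      (PySem.Dict.mk slot).get? "status" = some "Released")
instance (slots : List (List (String × String))) (slot_id : String) : Decidable (Pre_cancel_slot slots slot_id) := by unfold Pre_cancel_slot; infer_instance

def pvWitness_cancel_slot : (List (List (String × String))) × String :=
  ([[("id", "1"), ("status", "Created")], [("id", "2"), ("status", "Busy")]], "1")

def Spec_cancel_slot (slots : List (List (String × String))) (slot_id : String) (out : List (List (String × String))) : Prop := out = cancel_slot_alt slots slot_id
instance (slots : List (List (String × String))) (slot_id : String) (out : List (List (String × String))) : Decidable (Spec_cancel_slot slots slot_id out) := by unfold Spec_cancel_slot; infer_instance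

-- ===== CLAIM (what is proved, stated in full; the proofs are below) =====
def Claim_equal_cancel_slot : Prop := ∀ (slots : List (List (String × String))) (slot_id : String), Dom_cancel_slot slots slot_id → Pre_cancel_slot slots slot_id → Spec_cancel_slot slots slot_id (cancel_slot slots slot_id)

-- ===== LEMMAS AND PROOFS =====

-- Under Pre_, A's loop returns `some (acc ++ map ...)`, i.e. the accumulator followed by
-- exactly what B's comprehension produces for the remaining slots.
theorem cancel_slot_loopA_eq (slot_id : String) (l : List (List (String × String)))
    (acc : List (List (String × String)))
    (h : ∀ slot ∈ l, ((PySem.Dict.mk slot).get? "id").isSome = true ∧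
      ((PySem.Dict.mk slot).get? "id" = some slot_id →
        (PySem.Dict.mk slot).get? "status" = some "Created" ∨
        (PySem.Dict.mk slot).get? "status" = some "Released")) :
    cancel_slot_loopA slot_id l acc =
      some (acc ++ l.map (fun slot =>
        if (PySem.Dict.mk slot).getD "id" "" = slot_id
        then ((PySem.Dict.mk slot).insert "status" "Cancelled").items
        else slot)) := by
  induction l generalizing acc with
  | nil => simp [cancel_slot_loopA]
  | cons slot rest ih =>
    obtain ⟨h1, h2⟩ := h slot (by simp)
    obtain ⟨i, hi⟩ := Option.isSome_iff_exists.mp h1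
    have hrest := fun s hs => h s (List.mem_cons_of_mem _ hs)
    have hgetD : (PySem.Dict.mk slot).getD "id" "" = i := by
      rw [PySem.Dict.getD_eq_get?_getD, hi]; rfl
    by_cases hid : i = slot_id
    · subst hid
      rcases h2 hi with hst | hst <;>
        simp [cancel_slot_loopA, hi, hst, hgetD, ih _ hrest]
    · simp [cancel_slot_loopA, hi, hid, hgetD, ih _ hrest]

-- Under Pre_, B's validation pass succeeds.
theorem cancel_slot_validate_eq_true (slot_id : String) (l : List (List (String × String)))
    (h : ∀ slot ∈ l, ((PySem.Dict.mk slot).get? "id").isSome = true ∧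
      ((PySem.Dict.mk slot).get? "id" = some slot_id →
        (PySem.Dict.mk slot).get? "status" = some "Created" ∨
        (PySem.Dict.mk slot).get? "status" = some "Released")) :
    cancel_slot_validate slot_id l = true := by
  induction l with
  | nil => simp [cancel_slot_validate]
  | cons slot rest ih =>
    obtain ⟨h1, h2⟩ := h slot (by simp)
    obtain ⟨i, hi⟩ := Option.isSome_iff_exists.mp h1
    have hrest := ih (fun s hs => h s (List.mem_cons_of_mem _ hs))
    by_cases hid : i = slot_id
    · subst hid
      rcases h2 hi with hst | hst <;>
        simp [cancel_slot_validate, hi, hst, hrest]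
    · simp [cancel_slot_validate, hi, hid, hrest]

-- ===== VERDICT (by name: the statement is the Claim_ definition above) =====
theorem cancel_slot_spec : Claim_equal_cancel_slot := by
  intro slots slot_id _ hpre
  unfold Spec_cancel_slot cancel_slot cancel_slot_alt
  rw [cancel_slot_validate_eq_true slot_id slots hpre,
      cancel_slot_loopA_eq slot_id slots [] hpre]
  simp
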